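-- pv_equiv track=rewrite | github.com/BacroXP/BibleApp | bible/app.py | dec_to_hebrew
-- ===== SOURCE A (Python) =====
-- def dec_to_hebrew(num):
--     if num == 15: return "טו"
--     if num == 16: return "טז"
--     values = [400,300,200,100,90,80,70,60,50,40,30,20,10,9,8,7,6,5,4,3,2,1]
--     letters = ["ת","ש","ר","ק","צ","פ","ע","ס","נ","מ","ל","כ","י","ט","ח","ז","ו","ה","ד","ג","ב","א"]
--     result = ""
--     for i, val in enumerate(values):
--         while num >= val:
--             num -= val
--             result += letters[i]
--     return result
-- ===== SOURCE B (Python) =====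
-- def dec_to_hebrew(num):
--     if num == 15: return "טו"
--     if num == 16: return "טז"
--     pairs = [(400,"ת"),(300,"ש"),(200,"ר"),(100,"ק"),(90,"צ"),(80,"פ"),(70,"ע"),
--              (60,"ס"),(50,"נ"),(40,"מ"),(30,"ל"),(20,"כ"),(10,"י"),(9,"ט"),(8,"ח"),
--              (7,"ז"),(6,"ו"),(5,"ה"),(4,"ד"),(3,"ג"),(2,"ב"),(1,"א")]
--     result = ""
--     for val, letter in pairs:
--         if num >= val:
--             count = num // val
--             result += letter * count
--             num -= count * val
--     return result
-- ===== Notes on version B (the rewrite author's own statement) =====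
-- stated objective: faster
-- what changed: Replaces the inner repeated-subtraction while loop with a single integer division per value: count = num // val, append letter * count, subtract count * val.
import Mathlib
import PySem

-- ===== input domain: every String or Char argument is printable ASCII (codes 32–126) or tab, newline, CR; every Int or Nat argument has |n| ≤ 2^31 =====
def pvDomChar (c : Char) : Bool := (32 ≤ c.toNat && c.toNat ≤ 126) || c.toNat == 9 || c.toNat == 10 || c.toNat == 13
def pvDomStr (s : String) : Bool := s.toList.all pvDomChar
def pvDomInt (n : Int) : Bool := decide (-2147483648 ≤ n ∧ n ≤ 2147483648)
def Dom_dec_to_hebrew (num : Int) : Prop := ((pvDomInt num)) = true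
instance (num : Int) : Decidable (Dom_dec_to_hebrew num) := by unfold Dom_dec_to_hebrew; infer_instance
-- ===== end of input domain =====

-- B replaces A's inner repeated-subtraction while loop by one integer division per value
-- (count = num // val; append letter * count); return values proved equal for all ints.

-- the values/letters tables of both Pythons, zipped
def hebPairs : List (Int × String) :=
  [(400,"ת"),(300,"ש"),(200,"ר"),(100,"ק"),(90,"צ"),(80,"פ"),(70,"ע"),
   (60,"ס"),(50,"נ"),(40,"מ"),(30,"ל"),(20,"כ"),(10,"י"),(9,"ט"),(8,"ח"),
   (7,"ז"),(6,"ו"),(5,"ה"),(4,"ד"),(3,"ג"),(2,"ב"),(1,"א")]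

-- ===== PORT A =====
-- the inner `while num >= val: num -= val; result += letters[i]` loop of A
-- (hval only justifies termination; every value in A's table is positive)
def hebInner (val : Int) (letter : String) (hval : 0 < val) (num : Int) (result : String) :
    Int × String :=
  if val ≤ num then hebInner val letter hval (num - val) (result ++ letter) else (num, result)
termination_by num.toNat
decreasing_by omega

-- A's `for i, val in enumerate(values)` loop over the zipped tables
def hebLoopA : (pairs : List (Int × String)) → (∀ p ∈ pairs, 0 < p.1) → Int → String → String
  | [], _, _, result => result
  | p :: rest, h, num, result =>
      let r := hebInner p.1 p.2 (h p (by simp)) num result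
      hebLoopA rest (fun q hq => h q (by simp [hq])) r.1 r.2

def dec_to_hebrew (num : Int) : String :=
  if num = 15 then "טו" else
  if num = 16 then "טז" else
  hebLoopA hebPairs (by decide) num ""

-- ===== PORT B =====
-- Python `letter * count` for a nonnegative count of copies
def strRep (s : String) : Nat → String
  | 0 => ""
  | n + 1 => s ++ strRep s n

-- Python `letter * count` with an int count (≤ 0 gives "")
def pyStrMul (s : String) (n : Int) : String := strRep s n.toNat

def dec_to_hebrew_alt (num : Int) : String :=
  if num = 15 then "טו" else
  if num = 16 then "טז" else
  (hebPairs.foldl (fun (st : Int × String) p =>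
      if p.1 ≤ st.1 then
        let count := PySem.Int.floordiv st.1 p.1
        (st.1 - count * p.1, st.2 ++ pyStrMul p.2 count)
      else st) (num, "")).2

-- ===== PRECONDITION & SPEC =====
def Spec_dec_to_hebrew (num : Int) (out : String) : Prop := out = dec_to_hebrew_alt num
instance (num : Int) (out : String) : Decidable (Spec_dec_to_hebrew num out) := by unfold Spec_dec_to_hebrew; infer_instance

-- ===== CLAIM (what is proved, stated in full; the proofs are below) =====
def Claim_equal_dec_to_hebrew : Prop := ∀ (num : Int), Dom_dec_to_hebrew num → Spec_dec_to_hebrew num (dec_to_hebrew num)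

-- ===== LEMMAS AND PROOFS =====

-- A's inner while loop computes one floor division worth of copies in one go
lemma hebInner_eq (val : Int) (letter : String) (hval : 0 < val) (num : Int) (result : String) :
    hebInner val letter hval num result =
      if val ≤ num then
        (num - PySem.Int.floordiv num val * val,
         result ++ strRep letter (PySem.Int.floordiv num val).toNat)
      else (num, result) := by
  induction num, result using hebInner.induct val letter hval with
  | case1 num result hle ih =>
      rw [hebInner, if_pos hle, ih]
      have hq : PySem.Int.floordiv num val = PySem.Int.floordiv (num - val) val + 1 := by
        rw [PySem.Int.floordiv_eq_ediv_of_pos hval, PySem.Int.floordiv_eq_ediv_of_pos hval]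
        have h := Int.add_mul_ediv_right (num - val) 1 (show val ≠ 0 by omega)
        have he : num - val + 1 * val = num := by ring
        rw [he] at h
        omega
      by_cases h2 : val ≤ num - val
      · rw [if_pos h2, if_pos hle]
        have hq' : 0 ≤ PySem.Int.floordiv (num - val) val := by
          rw [PySem.Int.floordiv_eq_ediv_of_pos hval]
          exact Int.ediv_nonneg (by omega) (by omega)
        simp only [Prod.mk.injEq]
        refine ⟨?_, ?_⟩
        · rw [hq]; ring
        · rw [hq]
          have : (PySem.Int.floordiv (num - val) val + 1).toNat
              = (PySem.Int.floordiv (num - val) val).toNat + 1 := by omega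
          rw [this, strRep, ← String.append_assoc]
      · rw [if_neg h2, if_pos hle]
        have h0 : PySem.Int.floordiv (num - val) val = 0 := by
          rw [PySem.Int.floordiv_eq_ediv_of_pos hval]
          exact Int.ediv_eq_zero_of_lt (by omega) (by omega)
        rw [hq, h0]
        norm_num [strRep]
  | case2 num result hle =>
      rw [hebInner, if_neg hle, if_neg hle]

-- the two outer loops agree pair by pair
lemma loop_eq : ∀ (pairs : List (Int × String)) (h : ∀ p ∈ pairs, 0 < p.1)
    (num : Int) (result : String),
    hebLoopA pairs h num result =
      (pairs.foldl (fun (st : Int × String) p =>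
          if p.1 ≤ st.1 then
            let count := PySem.Int.floordiv st.1 p.1
            (st.1 - count * p.1, st.2 ++ pyStrMul p.2 count)
          else st) (num, result)).2
  | [], _, num, result => rfl
  | p :: rest, h, num, result => by
      rw [hebLoopA, List.foldl_cons]
      simp only [hebInner_eq]
      by_cases hle : p.1 ≤ num
      · simp only [if_pos hle]
        exact loop_eq rest _ _ _
      · simp only [if_neg hle]
        exact loop_eq rest _ _ _

-- ===== VERDICT (by name: the statement is the Claim_ definition above) =====
theorem dec_to_hebrew_spec : Claim_equal_dec_to_hebrew := by
  intro num _
  unfold Spec_dec_to_hebrew dec_to_hebrew dec_to_hebrew_alt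
  by_cases h15 : num = 15
  · simp [h15]
  by_cases h16 : num = 16
  · simp [h16]
  simp only [if_neg h15, if_neg h16]
  exact loop_eq hebPairs (by decide) num ""
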